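-- pv_equiv track=rewrite | github.com/MrBrantCode/unitest_baseline | mut_generate/mist_train_cf/cf_78301/solution.py | checkUniformity
-- ===== SOURCE A (Python) =====
-- def checkUniformity(lst):
--     """
--     Checks if every string in the list is composed exclusively of either alphabets or numerics.
--
--     Args:
--         lst (list): A list of strings.
--
--     Returns:
--         bool: 'true' if every string in the list is composed exclusively of either alphabets or numerics, 'false' otherwise.
--     """
--     if not all(isinstance(x, str) for x in lst):
--         return False
--
--     if not lst:
--         return False
--
--     is_prev_alphabetic = lst[0].isalpha()
--     is_prev_numeric = lst[0].isnumeric()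
--
--     for string in lst[1:]:
--         is_curr_alphabetic = string.isalpha()
--         is_curr_numeric = string.isnumeric()
--
--         if (is_curr_alphabetic, is_curr_numeric) != (is_prev_alphabetic, is_prev_numeric):
--             return False
--
--     return True
-- ===== SOURCE B (Python) =====
-- def checkUniformity(lst):
--     if not all(isinstance(x, str) for x in lst):
--         return False
--     classes = {(s.isalpha(), s.isnumeric()) for s in lst}
--     return len(classes) == 1
-- ===== Notes on version B (the rewrite author's own statement) =====
-- stated objective: simpler
-- what changed: Replaces A's empty-guard plus compare-to-first early-return loop with a one-pass set of (isalpha, isnumeric) classification tuples and a cardinality-1 check (the empty list gives an empty set, so no separate guard is needed).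
import Mathlib
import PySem

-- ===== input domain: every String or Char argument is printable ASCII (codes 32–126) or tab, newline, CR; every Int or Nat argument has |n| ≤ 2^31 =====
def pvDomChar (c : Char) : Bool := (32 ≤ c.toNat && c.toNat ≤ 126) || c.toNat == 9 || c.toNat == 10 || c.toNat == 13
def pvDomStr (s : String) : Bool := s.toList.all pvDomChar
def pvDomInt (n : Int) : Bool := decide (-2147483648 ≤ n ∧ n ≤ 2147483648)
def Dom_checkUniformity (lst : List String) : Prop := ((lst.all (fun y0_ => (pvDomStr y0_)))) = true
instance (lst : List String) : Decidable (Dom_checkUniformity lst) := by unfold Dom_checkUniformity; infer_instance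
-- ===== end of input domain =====

-- B replaces A's compare-to-first early-return loop with a set of (isalpha, isnumeric)
-- classification tuples and a cardinality-1 check; return values agree everywhere.
-- (Python's str.isnumeric coincides with str.isdigit on the printable-ASCII Dom, so both
--  ports use PySem.Str.strIsdigit for it — exact on Dom_checkUniformity.)
-- ===== PORT A =====
-- A's for-loop with early 'return False', as a structural recursion over lst[1:]
def checkUniformityLoop (pa pn : Bool) : List String → Bool
  | [] => true
  | s :: rest =>
    let ca := PySem.Str.strIsalpha s
    let cn := PySem.Str.strIsdigit s
    if (ca, cn) ≠ (pa, pn) then false else checkUniformityLoop pa pn rest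

def checkUniformity (lst : List String) : Bool :=
  -- isinstance guard is vacuous under the type convention (all elements are str)
  match lst with
  | [] => false
  | h :: t =>
    let pa := PySem.Str.strIsalpha h
    let pn := PySem.Str.strIsdigit h
    checkUniformityLoop pa pn t

-- ===== PORT B =====
def checkUniformity_alt (lst : List String) : Bool :=
  let classes : PySem.Set (Bool × Bool) :=
    PySem.Set.ofList (lst.map (fun s => (PySem.Str.strIsalpha s, PySem.Str.strIsdigit s)))
  classes.length == 1

-- ===== PRECONDITION & SPEC =====
def Spec_checkUniformity (lst : List String) (out : Bool) : Prop := out = checkUniformity_alt lst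
instance (lst : List String) (out : Bool) : Decidable (Spec_checkUniformity lst out) := by unfold Spec_checkUniformity; infer_instance

-- ===== CLAIM (what is proved, stated in full; the proofs are below) =====
def Claim_equal_checkUniformity : Prop := ∀ (lst : List String), Dom_checkUniformity lst → Spec_checkUniformity lst (checkUniformity lst)

-- ===== LEMMAS AND PROOFS =====
theorem length_le_foldl_add {α : Type} [BEq α] (cs : List α) (s : PySem.Set α) :
    s.length ≤ (cs.foldl PySem.Set.add s).length := by
  induction cs generalizing s with
  | nil => simp
  | cons x rest ih =>
    refine le_trans ?_ (ih (PySem.Set.add s x))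
    simp only [PySem.Set.add, PySem.Set.contains]
    split <;> simp

theorem foldl_add_singleton_len (c : Bool × Bool) (cs : List (Bool × Bool)) :
    ((cs.foldl PySem.Set.add [c]).length == 1) = cs.all (fun x => x == c) := by
  induction cs with
  | nil => rfl
  | cons x rest ih =>
    by_cases hx : x = c
    · subst hx
      simpa [PySem.Set.add, PySem.Set.contains] using ih
    · have hadd : PySem.Set.add [x] c = [x, c] := by
        simp [PySem.Set.add, PySem.Set.contains, Ne.symm hx]
      have h2 : (2 : ℕ) ≤ (rest.foldl PySem.Set.add [c, x]).length := by
        simpa using length_le_foldl_add rest [c, x]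
      have hne : ((rest.foldl PySem.Set.add [c, x]).length == 1) = false := by
        have : (rest.foldl PySem.Set.add [c, x]).length ≠ 1 := by omega
        simpa using this
      simp [List.foldl, PySem.Set.add, PySem.Set.contains, hx, hne, beq_iff_eq]

theorem loop_eq_all (pa pn : Bool) (t : List String) :
    checkUniformityLoop pa pn t
      = t.all (fun s => (PySem.Str.strIsalpha s, PySem.Str.strIsdigit s) == (pa, pn)) := by
  induction t with
  | nil => rfl
  | cons s rest ih =>
    simp only [checkUniformityLoop, List.all_cons, ih]
    split <;> simp_all

-- ===== VERDICT (by name: the statement is the Claim_ definition above) =====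
theorem checkUniformity_spec : Claim_equal_checkUniformity := by
  intro lst _
  unfold Spec_checkUniformity checkUniformity checkUniformity_alt
  cases lst with
  | nil => rfl
  | cons h t =>
    simp only [List.map_cons, PySem.Set.ofList_eq_foldl, List.foldl_cons]
    have hbase : PySem.Set.add ([] : PySem.Set (Bool × Bool))
        (PySem.Str.strIsalpha h, PySem.Str.strIsdigit h)
        = [(PySem.Str.strIsalpha h, PySem.Str.strIsdigit h)] := rfl
    rw [hbase, List.foldl_map, ]
    have := foldl_add_singleton_len (PySem.Str.strIsalpha h, PySem.Str.strIsdigit h)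
      (t.map (fun s => (PySem.Str.strIsalpha s, PySem.Str.strIsdigit s)))
    rw [List.foldl_map] at this
    rw [this, loop_eq_all, List.all_map]
    rfl
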